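-- pv_equiv track=rewrite | github.com/mgeromel/relex | data/RAMS/original_data/script.py | find
-- ===== SOURCE A (Python) =====
-- def find(index, sentences):
-- 	len_sum = 0
--
-- 	for rank, sent in enumerate(sentences):
-- 		next_len_sum = len_sum + len(sent)
--
-- 		if index >= len_sum and index < next_len_sum:
-- 			return rank
--
-- 		len_sum = next_len_sum
--
-- 	return -1
-- ===== SOURCE B (Python) =====
-- def find(index, sentences):
--     # Two-phase: build cumulative token counts, then binary-search the first
--     # prefix sum greater than index.
--     if index < 0:
--         return -1
--     cum = []
--     total = 0
--     for sent in sentences: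
--         total += len(sent)
--         cum.append(total)
--     lo, hi = 0, len(cum)
--     while lo < hi:
--         mid = (lo + hi) // 2
--         if cum[mid] <= index:
--             lo = mid + 1
--         else:
--             hi = mid
--     return lo if lo < len(cum) else -1
-- ===== Notes on version B (the rewrite author's own statement) =====
-- stated objective: alternative
-- what changed: Replaces the single accumulating linear scan with a two-phase prefix-sum table plus binary search over the cumulative counts.
import Mathlib
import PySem

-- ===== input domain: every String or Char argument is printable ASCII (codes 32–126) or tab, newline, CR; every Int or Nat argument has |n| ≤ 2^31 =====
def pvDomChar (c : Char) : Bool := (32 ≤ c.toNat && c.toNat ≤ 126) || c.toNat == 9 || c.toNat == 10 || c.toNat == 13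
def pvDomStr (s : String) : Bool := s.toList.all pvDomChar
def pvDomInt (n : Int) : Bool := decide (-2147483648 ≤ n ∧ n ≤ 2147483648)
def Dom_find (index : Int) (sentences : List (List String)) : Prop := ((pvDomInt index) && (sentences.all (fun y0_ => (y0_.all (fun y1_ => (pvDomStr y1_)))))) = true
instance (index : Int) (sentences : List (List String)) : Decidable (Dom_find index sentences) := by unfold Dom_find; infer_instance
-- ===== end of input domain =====

-- B replaces A's single accumulating linear scan with a prefix-sum table plus binary search (alternative structure, not faster).

-- ===== PORT A =====
-- A's for-loop over enumerate(sentences) with the running len_sum accumulator.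
def findLoop (index : Int) (rank : Int) (lenSum : Int) : List (List String) → Int
  | [] => -1
  | sent :: rest =>
      let nextLenSum := lenSum + (sent.length : Int)
      if index ≥ lenSum ∧ index < nextLenSum then rank
      else findLoop index (rank + 1) nextLenSum rest

def find (index : Int) (sentences : List (List String)) : Int :=
  findLoop index 0 0 sentences

-- ===== PORT B =====
-- B's first phase: the cumulative-length list (running total, appended per sentence).
def cums (total : Int) : List (List String) → List Int
  | [] => []
  | sent :: rest => (total + (sent.length : Int)) :: cums (total + (sent.length : Int)) rest

-- B's second phase: the while-loop binary search (bisect_right on cum).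
def bsearchGo (cum : List Int) (index : Int) (lo hi : Nat) : Nat :=
  if h : lo < hi then
    let mid := (lo + hi) / 2
    if cum.getD mid 0 ≤ index then bsearchGo cum index (mid + 1) hi
    else bsearchGo cum index lo mid
  else lo
termination_by hi - lo
decreasing_by all_goals omega

def find_alt (index : Int) (sentences : List (List String)) : Int :=
  if index < 0 then -1
  else
    let cum := cums 0 sentences
    let lo := bsearchGo cum index 0 cum.length
    if lo < cum.length then (lo : Int) else -1

-- ===== PRECONDITION & SPEC =====
def Spec_find (index : Int) (sentences : List (List String)) (out : Int) : Prop := out = find_alt index sentences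
instance (index : Int) (sentences : List (List String)) (out : Int) : Decidable (Spec_find index sentences out) := by unfold Spec_find; infer_instance

-- ===== CLAIM (what is proved, stated in full; the proofs are below) =====
def Claim_equal_find : Prop := ∀ (index : Int) (sentences : List (List String)), Dom_find index sentences → Spec_find index sentences (find index sentences)

-- ===== LEMMAS AND PROOFS =====

-- number of leading prefix sums ≤ index (= bisect_right's answer on the sorted cum list)
def tw (index : Int) (cum : List Int) : Nat :=
  (cum.takeWhile (fun c => decide (c ≤ index))).length

theorem tw_le (index : Int) (cum : List Int) : tw index cum ≤ cum.length :=
  (List.takeWhile_prefix _).length_le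

theorem tw_cons_pos (index a : Int) (l : List Int) (h : a ≤ index) :
    tw index (a :: l) = tw index l + 1 := by
  simp [tw, List.takeWhile_cons, h]

theorem tw_cons_neg (index a : Int) (l : List Int) (h : ¬ a ≤ index) :
    tw index (a :: l) = 0 := by
  simp [tw, List.takeWhile_cons, h]

theorem cums_length (total : Int) (L : List (List String)) : (cums total L).length = L.length := by
  induction L generalizing total with
  | nil => rfl
  | cons s rest ih => rw [cums]; simp [ih]

theorem cums_lb (total : Int) (L : List (List String)) (i : Nat) (hi : i < L.length) :
    total ≤ (cums total L).getD i 0 := by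
  induction L generalizing total i with
  | nil => simp at hi
  | cons s rest ih =>
      cases i with
      | zero =>
          rw [cums]
          simp only [List.getD_cons_zero]
          have h0 : (0:Int) ≤ (s.length : Int) := by positivity
          omega
      | succ j =>
          rw [cums]
          simp only [List.getD_cons_succ]
          have := ih (total + (s.length : Int)) j (by simpa using Nat.lt_of_succ_lt_succ hi)
          have h0 : (0:Int) ≤ (s.length : Int) := by positivity
          omega

theorem cums_iff (index : Int) (L : List (List String)) (total : Int) (htot : total ≤ index) :
    ∀ i, i < L.length → ((cums total L).getD i 0 ≤ index ↔ i < tw index (cums total L)) := by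
  induction L generalizing total with
  | nil => intro i hi; simp at hi
  | cons s rest ih =>
      intro i hi
      rw [cums]
      by_cases hle : total + (s.length : Int) ≤ index
      · rw [tw_cons_pos _ _ _ hle]
        cases i with
        | zero => simp [hle]
        | succ j =>
            have hj : j < rest.length := by simpa using Nat.lt_of_succ_lt_succ hi
            have h2 := ih (total + (s.length : Int)) hle j hj
            simp only [List.getD_cons_succ]
            omega
      · rw [tw_cons_neg _ _ _ hle]
        simp only [Nat.not_lt_zero, iff_false]
        cases i with
        | zero => simpa using hle
        | succ j =>
            have hj : j < rest.length := by simpa using Nat.lt_of_succ_lt_succ hi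
            have := cums_lb (total + (s.length : Int)) rest j hj
            simp only [List.getD_cons_succ]
            omega

theorem bsearchGo_eq (cum : List Int) (index : Int) (t : Nat)
    (H : ∀ i, i < cum.length → (cum.getD i 0 ≤ index ↔ i < t)) :
    ∀ k lo hi, hi - lo ≤ k → lo ≤ t → t ≤ hi → hi ≤ cum.length → bsearchGo cum index lo hi = t := by
  intro k
  induction k with
  | zero =>
      intro lo hi h0 h1 h2 h3
      have hlh : ¬ lo < hi := by omega
      rw [bsearchGo]; simp [hlh]; omega
  | succ k ih =>
      intro lo hi h0 h1 h2 h3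
      by_cases hlh : lo < hi
      · rw [bsearchGo]
        simp only [hlh, dif_pos]
        set mid := (lo + hi) / 2 with hmid
        have hm1 : lo ≤ mid := by omega
        have hm2 : mid < hi := by omega
        have hmlt : mid < cum.length := by omega
        by_cases hc : cum.getD mid 0 ≤ index
        · have hmt : mid < t := (H mid hmlt).mp hc
          simp only [hc, if_pos]
          exact ih (mid + 1) hi (by omega) (by omega) h2 h3
        · have hmt : ¬ mid < t := fun h => hc ((H mid hmlt).mpr h)
          simp only [hc, if_neg, not_false_iff]
          exact ih lo mid (by omega) h1 (by omega) (by omega)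
      · rw [bsearchGo]; simp [hlh]; omega

theorem findLoop_below (index : Int) (L : List (List String)) :
    ∀ rank lenSum, index < lenSum → findLoop index rank lenSum L = -1 := by
  induction L with
  | nil => intro rank lenSum _; rfl
  | cons s rest ih =>
      intro rank lenSum h
      have h0 : (0:Int) ≤ (s.length : Int) := by positivity
      rw [findLoop]
      have hc : ¬ (index ≥ lenSum ∧ index < lenSum + (s.length : Int)) := by omega
      simp only [hc, if_neg, not_false_iff]
      exact ih _ _ (by omega)

theorem findLoop_eq (index : Int) (L : List (List String)) :
    ∀ rank lenSum, lenSum ≤ index →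
      findLoop index rank lenSum L =
        if tw index (cums lenSum L) = L.length then -1
        else rank + (tw index (cums lenSum L) : Int) := by
  induction L with
  | nil => intro rank lenSum _; simp [findLoop, tw, cums]
  | cons s rest ih =>
      intro rank lenSum hle
      have h0 : (0:Int) ≤ (s.length : Int) := by positivity
      rw [findLoop, cums]
      by_cases hlt : index < lenSum + (s.length : Int)
      · have hc : index ≥ lenSum ∧ index < lenSum + (s.length : Int) := ⟨hle, hlt⟩
        rw [tw_cons_neg _ _ _ (by omega)]
        simp [hc]
      · have hc : ¬ (index ≥ lenSum ∧ index < lenSum + (s.length : Int)) := by omega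
        have hle' : lenSum + (s.length : Int) ≤ index := by omega
        rw [tw_cons_pos _ _ _ hle', if_neg hc, ih (rank + 1) _ hle']
        by_cases he : tw index (cums (lenSum + (s.length : Int)) rest) = rest.length
        · simp [he]
        · have hne : ¬ (tw index (cums (lenSum + (s.length : Int)) rest) + 1 = (s :: rest).length) := by
            simp; omega
          rw [if_neg he, if_neg hne]
          push_cast
          ring

-- ===== VERDICT (by name: the statement is the Claim_ definition above) =====
theorem find_spec : Claim_equal_find := by
  intro index sentences _
  unfold Spec_find find find_alt
  by_cases hneg : index < 0
  · rw [findLoop_below index sentences 0 0 hneg]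
    simp [hneg]
  · have hle : (0:Int) ≤ index := by omega
    rw [if_neg hneg]
    have hlen := cums_length 0 sentences
    have hb := bsearchGo_eq (cums 0 sentences) index (tw index (cums 0 sentences))
      (by intro i hi; exact cums_iff index sentences 0 hle i (by omega))
      (cums 0 sentences).length 0 (cums 0 sentences).length (by omega) (Nat.zero_le _)
      (tw_le _ _) (le_refl _)
    rw [findLoop_eq index sentences 0 0 hle]
    simp only [hb]
    have htle := tw_le index (cums 0 sentences)
    rw [hlen] at htle
    by_cases he : tw index (cums 0 sentences) = sentences.length
    · simp [he, hlen]
    · have hlt : tw index (cums 0 sentences) < sentences.length := by omega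
      simp [he, hlen, hlt]
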